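-- pv_equiv track=rewrite | github.com/MrBrantCode/unitest_baseline | mut_generate/mist_train_cf/cf_53543/solution.py | get_sorted_modes
-- ===== SOURCE A (Python) =====
-- from collections import Counter
--
-- def get_sorted_modes(lst):
--     if not lst:
--         return None
--
--     count = Counter(lst)
--     max_freq = max(count.values())
--
--     modes = [(k, v) for k, v in count.items() if v == max_freq]
--     modes.sort(key=lambda x: (-x[0]*x[1], x[0]))
--     return [mode for mode, _ in modes]
-- ===== SOURCE B (Python) =====
-- def get_sorted_modes(lst):
--     if not lst:
--         return None
--
--     groups = []  # (value, count) pairs, values strictly increasing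
--     for x in sorted(lst):
--         if groups and groups[-1][0] == x:
--             groups[-1] = (x, groups[-1][1] + 1)
--         else:
--             groups.append((x, 1))
--     best = max(c for _, c in groups)
--     return [v for v, c in reversed(groups) if c == best]
-- ===== Notes on version B (the rewrite author's own statement) =====
-- stated objective: alternative
-- what changed: B drops the Counter and the composite-key sort: it sorts the input once, counts runs in a single scan over the sorted list, then keeps the values whose run length is maximal, emitted in descending value order (valid because A's sort key (-value*freq, value) over the equal-frequency modes is exactly descending value order).
import Mathlib
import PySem

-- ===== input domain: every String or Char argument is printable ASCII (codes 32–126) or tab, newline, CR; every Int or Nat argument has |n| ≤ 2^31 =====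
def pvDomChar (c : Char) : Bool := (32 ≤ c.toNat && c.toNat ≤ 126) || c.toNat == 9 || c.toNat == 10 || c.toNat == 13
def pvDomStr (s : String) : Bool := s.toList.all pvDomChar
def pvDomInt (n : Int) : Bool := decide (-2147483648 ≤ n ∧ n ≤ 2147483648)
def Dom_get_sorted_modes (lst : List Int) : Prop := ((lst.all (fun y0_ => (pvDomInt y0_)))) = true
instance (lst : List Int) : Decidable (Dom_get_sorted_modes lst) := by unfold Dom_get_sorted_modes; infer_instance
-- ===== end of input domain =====

-- B replaces A's Counter + composite-key sort by a sort-then-run-length scan: count the sorted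
-- input's runs, keep the values whose run length is maximal, in descending value order (valid
-- because A's key (-value*freq, value) over the equal-frequency modes is exactly descending order).

-- ===== PORT A =====
def get_sorted_modes (lst : List Int) : Option (List Int) :=
  if lst = [] then
    none
  else
    let count := PySem.Dict.counter lst
    -- max(count.values()): lst ≠ [] makes the values nonempty, so max? is some and the default is never used
    let max_freq := (PySem.List.max? (PySem.Dict.values count) (fun v => v)).getD 0
    let modes := count.items.filter (fun p => p.2 == max_freq)
    let modesSorted := PySem.List.sorted2 modes (fun p => -p.1 * p.2) (fun p => p.1) false
    some (modesSorted.map (fun p => p.1))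

-- ===== PORT B =====
-- one iteration of B's loop: 'if groups and groups[-1][0] == x: groups[-1] = (x, groups[-1][1] + 1)
-- else: groups.append((x, 1))'  (groups[-1] read via getLast?, none = empty groups)
def pvGroupStep (g : List (Int × Int)) (x : Int) : List (Int × Int) :=
  match g.getLast? with
  | some p => if p.1 == x then g.dropLast ++ [(x, p.2 + 1)] else g ++ [(x, 1)]
  | none => g ++ [(x, 1)]

def get_sorted_modes_alt (lst : List Int) : Option (List Int) :=
  if lst = [] then
    none
  else
    let groups := (PySem.List.sorted lst (fun x => x) false).foldl pvGroupStep []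
    -- max(c for _, c in groups): groups is nonempty here, so max? is some and the default is never used
    let best := (PySem.List.max? (groups.map (fun p => p.2)) (fun c => c)).getD 0
    some ((groups.reverse.filter (fun p => p.2 == best)).map (fun p => p.1))

-- ===== PRECONDITION & SPEC =====
def Spec_get_sorted_modes (lst : List Int) (out : Option (List Int)) : Prop := out = get_sorted_modes_alt lst
instance (lst : List Int) (out : Option (List Int)) : Decidable (Spec_get_sorted_modes lst out) := by unfold Spec_get_sorted_modes; infer_instance

-- ===== CLAIM (what is proved, stated in full; the proofs are below) =====
def Claim_equal_get_sorted_modes : Prop := ∀ (lst : List Int), Dom_get_sorted_modes lst → Spec_get_sorted_modes lst (get_sorted_modes lst)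

-- ===== LEMMAS AND PROOFS =====

-- insertBy with two tests that agree on all pairs drawn from P inserts identically.
theorem pv_insertBy_congr {α : Type} (b1 b2 : α → α → Bool) (P : α → Prop)
    (hb : ∀ x y, P x → P y → b1 x y = b2 x y) (x : α) (acc : List α)
    (hx : P x) (hacc : ∀ y ∈ acc, P y) :
    PySem.List.insertBy b1 x acc = PySem.List.insertBy b2 x acc := by
  induction acc with
  | nil => rfl
  | cons y ys ih =>
    have hy : P y := hacc y (by simp)
    have hys : ∀ z ∈ ys, P z := fun z hz => hacc z (by simp [hz])
    simp only [PySem.List.insertBy, hb x y hx hy, ih hys]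

-- the insertion-sort fold is determined by the test's restriction to the elements involved
theorem pv_foldl_insertBy_congr {α : Type} (b1 b2 : α → α → Bool) (P : α → Prop)
    (hb : ∀ x y, P x → P y → b1 x y = b2 x y) :
    ∀ (l acc : List α), (∀ x ∈ l, P x) → (∀ y ∈ acc, P y) →
      l.foldl (fun a x => PySem.List.insertBy b1 x a) acc
        = l.foldl (fun a x => PySem.List.insertBy b2 x a) acc := by
  intro l
  induction l with
  | nil => intro acc _ _; rfl
  | cons x xs ih =>
    intro acc hl hacc
    have hx : P x := hl x (by simp)
    have hxs : ∀ z ∈ xs, P z := fun z hz => hl z (by simp [hz])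
    simp only [List.foldl_cons]
    rw [pv_insertBy_congr b1 b2 P hb x acc hx hacc]
    exact ih _ hxs (fun y hy => ((PySem.List.mem_insertBy _ _ _ _).1 hy).elim (fun h => h ▸ hx) (hacc y))

-- on pairs whose second component is the (positive) max frequency, A's lexicographic test is descending order
theorem pv_before_eq (M x1 x2 y1 y2 : Int) (hM : 0 < M) (hx : x2 = M) (hy : y2 = M) :
    (decide (-x1 * x2 < -y1 * y2)
      || (!decide (-y1 * y2 < -x1 * x2) && decide (x1 < y1)))
      = decide (-x1 < -y1) := by
  rw [hx, hy]
  rcases lt_trichotomy x1 y1 with h | h | h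
  · have h1 : ¬ (-x1 * M < -y1 * M) := by nlinarith
    have h2 : -y1 * M < -x1 * M := by nlinarith
    have h3 : ¬ (-x1 < -y1) := by omega
    rw [decide_eq_false h1, decide_eq_true h2, decide_eq_false h3]
    simp
  · subst h
    simp
  · have h1 : -x1 * M < -y1 * M := by nlinarith
    have h3 : -x1 < -y1 := by omega
    rw [decide_eq_true h1, decide_eq_true h3]
    simp

-- max over a permuted Int list is the same value
theorem pv_maxD_eq_of_perm (xs ys : List Int) (hp : xs.Perm ys) :
    (PySem.List.max? xs (fun v => v)).getD 0 = (PySem.List.max? ys (fun v => v)).getD 0 := by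
  rcases hxs : PySem.List.max? xs (fun v => v) with _ | mx
  · rw [(PySem.List.max?_eq_none_iff xs _).1 hxs] at hp
    rw [(PySem.List.max?_eq_none_iff ys _).2 hp.nil_eq.symm]
  · rcases hys : PySem.List.max? ys (fun v => v) with _ | my
    · rw [(PySem.List.max?_eq_none_iff ys _).1 hys] at hp
      rw [hp.eq_nil, (PySem.List.max?_eq_none_iff _ _).2 rfl] at hxs
      cases hxs
    · have h1 : mx ≤ my := PySem.List.max?_isMax hys mx (hp.mem_iff.1 (PySem.List.max?_mem hxs))
      have h2 : my ≤ mx := PySem.List.max?_isMax hxs my (hp.mem_iff.2 (PySem.List.max?_mem hys))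
      simp [le_antisymm h1 h2]

-- every member of a ≤-sorted list is at most its last element
theorem pv_le_getLast (l : List Int) (hs : l.Pairwise (· ≤ ·)) (h : l ≠ []) :
    ∀ x ∈ l, x ≤ l.getLast h := by
  induction l with
  | nil => exact absurd rfl h
  | cons a t ih =>
    rcases eq_or_ne t [] with ht | ht
    · subst ht; intro x hx; simp at hx; simp [hx]
    · intro x hx
      rw [List.getLast_cons ht]
      rcases List.mem_cons.1 hx with rfl | hxt
      · have hlast : t.getLast ht ∈ t := List.getLast_mem ht
        exact (List.pairwise_cons.1 hs).1 _ hlast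
      · exact ih (List.pairwise_cons.1 hs).2 ht x hxt

-- first-occurrence distinct elements form a sublist
theorem pv_ofList_sublist (xs : List Int) : List.Sublist (PySem.Set.ofList xs) xs := by
  induction xs using List.reverseRecOn with
  | nil => simp [PySem.Set.ofList_eq_foldl]
  | append_singleton xs x ih =>
    rw [PySem.Set.ofList_append]
    show List.Sublist (PySem.Set.add (PySem.Set.ofList xs) x) _
    unfold PySem.Set.add
    split
    · exact ih.trans (List.sublist_append_left xs [x])
    · exact ih.append (List.Sublist.refl [x])

-- appending one element to the underlying list
theorem pv_ofList_append_singleton (xs : List Int) (x : Int) :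
    PySem.Set.ofList (xs ++ [x])
      = if x ∈ xs then PySem.Set.ofList xs else PySem.Set.ofList xs ++ [x] := by
  rw [PySem.Set.ofList_append]
  show PySem.Set.add (PySem.Set.ofList xs) x = _
  unfold PySem.Set.add PySem.Set.contains
  rcases em (x ∈ xs) with h | h
  · rw [if_pos (by simpa [List.contains_iff_mem, PySem.Set.mem_ofList] using h), if_pos h]
  · rw [if_neg (by simpa [List.contains_iff_mem, PySem.Set.mem_ofList] using h), if_neg h]

-- unfold one loop iteration once the last pair is known
theorem pv_step_last (g : List (Int × Int)) (x : Int) (p : Int × Int) (h : g.getLast? = some p) :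
    pvGroupStep g x = if p.1 == x then g.dropLast ++ [(x, p.2 + 1)] else g ++ [(x, 1)] := by
  unfold pvGroupStep
  rw [h]

-- B's run-length fold over a ≤-sorted list yields each distinct value with its count, ascending
theorem pv_groups_eq (S : List Int) (hs : S.Pairwise (· ≤ ·)) :
    S.foldl pvGroupStep []
      = (PySem.Set.ofList S).map (fun k => (k, (List.count k S : Int))) := by
  induction S using List.reverseRecOn with
  | nil => simp [PySem.Set.ofList_eq_foldl]
  | append_singleton S x ih =>
    have hsS : S.Pairwise (· ≤ ·) := (List.pairwise_append.1 hs).1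
    have hub : ∀ s ∈ S, s ≤ x := fun s hsmem =>
      (List.pairwise_append.1 hs).2.2 s hsmem x (by simp)
    rw [List.foldl_append, List.foldl_cons, List.foldl_nil, ih hsS]
    rcases eq_or_ne S [] with rfl | hSne
    · simp [pvGroupStep, PySem.Set.ofList_eq_foldl, PySem.Set.add, PySem.Set.contains]
    · have hTne : PySem.Set.ofList S ≠ [] := by
        rcases List.exists_mem_of_ne_nil S hSne with ⟨y, hy⟩
        intro h
        exact absurd ((PySem.Set.mem_ofList S y).2 hy) (by simp [h])
      set T := PySem.Set.ofList S with hT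
      have hTsub : List.Sublist T S := pv_ofList_sublist S
      have hTpair : T.Pairwise (· ≤ ·) := List.Pairwise.sublist hTsub hsS
      have hTnd : T.Nodup := PySem.Set.nodup_ofList S
      set t0 := T.getLast hTne with ht0
      have ht0S : t0 ∈ S := hTsub.mem (List.getLast_mem hTne)
      have hgl : (T.map (fun k => (k, (List.count k S : Int)))).getLast?
          = some (t0, (List.count t0 S : Int)) := by
        rw [List.getLast?_map, List.getLast?_eq_some_getLast hTne]
        rfl
      rcases em (x ∈ S) with hxS | hxS
      · -- x closes the last run: t0 = x
        have hxt0 : t0 = x := le_antisymm (hub t0 ht0S)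
          (pv_le_getLast T hTpair hTne x ((PySem.Set.mem_ofList S x).2 hxS))
        have hdecomp : T.dropLast ++ [x] = T := by
          rw [← hxt0, ht0]; exact List.dropLast_append_getLast hTne
        have hxdl : x ∉ T.dropLast := by
          intro hmem
          have := hdecomp ▸ hTnd
          exact (List.disjoint_of_nodup_append this) hmem (by simp)
        have hgl' : (T.map (fun k => (k, (List.count k S : Int)))).getLast?
            = some (x, (List.count x S : Int)) := by rw [hgl, hxt0]
        rw [pv_step_last _ x _ hgl', if_pos (by simp)]
        rw [pv_ofList_append_singleton S x, if_pos hxS, ← hT]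
        have hmap : ∀ (f : Int → Int × Int), T.map f = (T.dropLast).map f ++ [f x] := by
          intro f
          conv_lhs => rw [← hdecomp]
          rw [List.map_append]
          rfl
        rw [hmap, List.dropLast_concat, hmap]
        congr 1
        · exact List.map_congr_left (fun k hk => by
            have hkx : k ≠ x := fun h => hxdl (h ▸ hk)
            simp [List.count_append, Ne.symm hkx])
        · have hcx : List.count x (S ++ [x]) = List.count x S + 1 := by
            simp [List.count_append]
          simp [hcx]
      · -- x starts a new run: t0 ≠ x
        have hxt0 : t0 ≠ x := fun h => hxS (h ▸ ht0S)
        rw [pv_step_last _ x _ hgl, if_neg (by simp [hxt0])]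
        rw [pv_ofList_append_singleton S x, if_neg hxS, ← hT]
        rw [List.map_append]
        congr 1
        · exact List.map_congr_left (fun k hk => by
            have hkx : k ≠ x := fun h => hxS (h ▸ ((PySem.Set.mem_ofList S k).1 hk))
            simp [List.count_append, Ne.symm hkx])
        · simp [List.count_append, List.count_eq_zero_of_not_mem hxS]

-- ===== VERDICT (by name: the statement is the Claim_ definition above) =====
theorem get_sorted_modes_spec : Claim_equal_get_sorted_modes := by
  intro lst _
  unfold Spec_get_sorted_modes get_sorted_modes get_sorted_modes_alt
  by_cases hnil : lst = []
  · simp [hnil]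
  · simp only [if_neg hnil]
    set c : Int → Int := fun k => (List.count k lst : Int) with hc
    set Sl : List Int := PySem.List.sorted lst (fun x => x) false with hSl
    have hpermSl : Sl.Perm lst := PySem.List.sorted_perm lst _ false
    have hSlpair : Sl.Pairwise (· ≤ ·) := by
      simpa using PySem.List.sorted_pairwise lst (fun x => x)
    -- B's groups
    have hcount : (fun k => (k, (List.count k Sl : Int))) = fun k => (k, c k) := by
      funext k; simp [hc, hpermSl.count_eq]
    have hgroups : Sl.foldl pvGroupStep []
        = (PySem.Set.ofList Sl).map (fun k => (k, c k)) := by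
      rw [pv_groups_eq Sl hSlpair, hcount]
    set U : List Int := PySem.Set.ofList Sl with hU
    have hUnd : U.Nodup := PySem.Set.nodup_ofList Sl
    have hUpair : U.Pairwise (· ≤ ·) := List.Pairwise.sublist (pv_ofList_sublist Sl) hSlpair
    have hUperm : U.Perm (PySem.Set.ofList lst) :=
      (List.perm_ext_iff_of_nodup hUnd (PySem.Set.nodup_ofList lst)).2 (fun a => by
        rw [hU, PySem.Set.mem_ofList, PySem.Set.mem_ofList, hpermSl.mem_iff])
    set uniq : List Int := U.reverse with huniq
    have hperm : uniq.Perm (PySem.Set.ofList lst) := U.reverse_perm.trans hUperm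
    have hnodup : uniq.Nodup := by simpa [huniq] using hUnd
    have hdesc : uniq.Pairwise (fun a b => b < a) := by
      have h1 : uniq.Pairwise (fun a b => b ≤ a) := List.pairwise_reverse.2 hUpair
      exact (h1.and hnodup).imp (fun {a b} h => lt_of_le_of_ne h.1 (Ne.symm h.2))
    -- A's values are c over the distinct elements
    have hvalues : PySem.Dict.values (PySem.Dict.counter lst) = (PySem.Set.ofList lst).map c := by
      show (PySem.Dict.counter lst).items.map (fun p => p.2) = _
      rw [PySem.Dict.items_counter]
      simp [Function.comp_def, hc]
    -- the two maxima agree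
    have hmax : (PySem.List.max? (((Sl.foldl pvGroupStep []).map (fun p => p.2))) (fun v => v)).getD 0
        = (PySem.List.max? (PySem.Dict.values (PySem.Dict.counter lst)) (fun v => v)).getD 0 := by
      rw [hgroups, hvalues, List.map_map]
      have hcomp : ((fun p : Int × Int => p.2) ∘ fun k => (k, c k)) = c := by
        funext k; rfl
      rw [hcomp]
      exact pv_maxD_eq_of_perm _ _ (hUperm.map c)
    set M : Int := (PySem.List.max? (PySem.Dict.values (PySem.Dict.counter lst)) (fun v => v)).getD 0 with hM
    -- M is positive: it is the count of some element of lst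
    have hSetne : PySem.Set.ofList lst ≠ [] := by
      rcases List.exists_mem_of_ne_nil lst hnil with ⟨x, hx⟩
      intro h
      exact absurd ((PySem.Set.mem_ofList lst x).2 hx) (by simp [h])
    have hMpos : 0 < M := by
      rcases hm : PySem.List.max? ((PySem.Set.ofList lst).map c) (fun v => v) with _ | m
      · exact absurd (List.map_eq_nil_iff.1 ((PySem.List.max?_eq_none_iff _ _).1 hm)) hSetne
      · rcases List.mem_map.1 (PySem.List.max?_mem hm) with ⟨k, hk, hkm⟩
        have hkl : k ∈ lst := (PySem.Set.mem_ofList lst k).1 hk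
        have : 0 < c k := by
          simp only [hc]
          exact_mod_cast List.count_pos_iff.2 hkl
        rw [hM, hvalues, hm]
        simpa [hkm] using this
    -- A's modes list, as a map over the filtered distinct values
    have hmodes : (PySem.Dict.counter lst).items.filter (fun p => p.2 == M)
        = ((PySem.Set.ofList lst).filter (fun k => c k == M)).map (fun k => (k, c k)) := by
      rw [PySem.Dict.items_counter, List.filter_map]
      simp [Function.comp_def, hc]
    -- B's kept pairs: the filtered distinct values, descending
    have hB : (Sl.foldl pvGroupStep []).reverse.filter (fun p => p.2 == M)
        = (uniq.filter (fun v => c v == M)).map (fun v => (v, c v)) := by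
      rw [hgroups, ← List.map_reverse, ← huniq, List.filter_map]
      simp [Function.comp_def]
    have hDpair : ((uniq.filter (fun v => c v == M)).map (fun v => (v, c v))).Pairwise
        (fun (p q : Int × Int) => (fun r : Int × Int => -r.1) p < (fun r : Int × Int => -r.1) q) := by
      rw [List.pairwise_map]
      exact (hdesc.filter _).imp (fun {a b} h => by simpa using h)
    have hDperm : ((uniq.filter (fun v => c v == M)).map (fun v => (v, c v))).Perm
        ((PySem.Dict.counter lst).items.filter (fun p => p.2 == M)) := by
      rw [hmodes]
      exact (hperm.filter _).map _
    -- A's sort: its lexicographic test coincides with "descending first component" on the modes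
    have hsort : PySem.List.sorted2 ((PySem.Dict.counter lst).items.filter (fun p => p.2 == M))
          (fun p => -p.1 * p.2) (fun p => p.1) false
        = (uniq.filter (fun v => c v == M)).map (fun v => (v, c v)) := by
      have hmem2 : ∀ p ∈ (PySem.Dict.counter lst).items.filter (fun p => p.2 == M), p.2 = M := by
        intro p hp
        have := List.of_mem_filter hp
        simpa using this
      have hcong : PySem.List.sorted2 ((PySem.Dict.counter lst).items.filter (fun p => p.2 == M))
            (fun p => -p.1 * p.2) (fun p => p.1) false
          = PySem.List.sorted ((PySem.Dict.counter lst).items.filter (fun p => p.2 == M))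
            (fun p : Int × Int => -p.1) false := by
        rw [PySem.List.sorted_eq_foldl_insertBy]
        show List.foldl (fun acc x => PySem.List.insertBy _ x acc) [] _ = _
        exact pv_foldl_insertBy_congr _ _
          (fun p : Int × Int => p ∈ (PySem.Dict.counter lst).items.filter (fun p => p.2 == M))
          (fun x y hx hy => pv_before_eq M x.1 x.2 y.1 y.2 hMpos (hmem2 x hx) (hmem2 y hy))
          _ [] (fun x hx => hx) (by simp)
      rw [hcong]
      exact PySem.List.sorted_eq_of_perm_of_pairwise_lt _ _ _ hDperm hDpair
    rw [hmax, hB, hsort]
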